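-- pv_equiv track=rewrite | github.com/wblv-dev/domain-security-toolkit | reverse_dns.py | grade_reverse_dns
-- ===== SOURCE A (Python) =====
-- from typing import Dict, List
--
-- def grade_reverse_dns(ptr_results: List[dict]) -> dict:
--     """Grade reverse DNS results."""
--     if not ptr_results:
--         return {
--             "grade": "INFO",
--             "reason": "No MX records — reverse DNS not applicable",
--         }
--
--     missing = [r for r in ptr_results if r["status"] == "missing"]
--     mismatched = [r for r in ptr_results if r["status"] == "mismatch"]
--     confirmed = [r for r in ptr_results if r["status"] == "confirmed"]
--
--     if missing:
--         ips = ", ".join(r["ip"] for r in missing[:3])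
--         return {
--             "grade": "FAIL",
--             "reason": f"No PTR record for {len(missing)} IP(s): {ips}",
--         }
--     elif mismatched:
--         return {
--             "grade": "WARN",
--             "reason": f"{len(mismatched)} IP(s) have PTR but fail forward confirmation",
--         }
--     else:
--         return {
--             "grade": "PASS",
--             "reason": f"All {len(confirmed)} mail server IP(s) have valid forward-confirmed rDNS",
--         }
-- ===== SOURCE B (Python) =====
-- from typing import Dict, List
--
-- def grade_reverse_dns(ptr_results: List[dict]) -> dict:
--     """Grade reverse DNS results (single-pass bucketing re-implementation)."""
--     if not ptr_results:
--         return {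
--             "grade": "INFO",
--             "reason": "No MX records — reverse DNS not applicable",
--         }
--     first_ips = []          # ips of the first (up to) three missing records
--     n_missing = n_mismatch = n_confirmed = 0
--     for r in ptr_results:
--         s = r["status"]
--         if s == "missing":
--             n_missing += 1
--             if len(first_ips) < 3:
--                 first_ips.append(r["ip"])
--         elif s == "mismatch":
--             n_mismatch += 1
--         elif s == "confirmed":
--             n_confirmed += 1
--     if n_missing:
--         return {
--             "grade": "FAIL",
--             "reason": f"No PTR record for {n_missing} IP(s): {', '.join(first_ips)}",
--         }
--     if n_mismatch:
--         return {
--             "grade": "WARN",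
--             "reason": f"{n_mismatch} IP(s) have PTR but fail forward confirmation",
--         }
--     return {
--         "grade": "PASS",
--         "reason": f"All {n_confirmed} mail server IP(s) have valid forward-confirmed rDNS",
--     }
-- ===== Notes on version B (the rewrite author's own statement) =====
-- stated objective: alternative
-- what changed: Replaces A's three filtering comprehensions (three scans plus a join over a slice) by one single pass that maintains three counters and the ip-list of the first three missing records, with the same branch priority.
import Mathlib
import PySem

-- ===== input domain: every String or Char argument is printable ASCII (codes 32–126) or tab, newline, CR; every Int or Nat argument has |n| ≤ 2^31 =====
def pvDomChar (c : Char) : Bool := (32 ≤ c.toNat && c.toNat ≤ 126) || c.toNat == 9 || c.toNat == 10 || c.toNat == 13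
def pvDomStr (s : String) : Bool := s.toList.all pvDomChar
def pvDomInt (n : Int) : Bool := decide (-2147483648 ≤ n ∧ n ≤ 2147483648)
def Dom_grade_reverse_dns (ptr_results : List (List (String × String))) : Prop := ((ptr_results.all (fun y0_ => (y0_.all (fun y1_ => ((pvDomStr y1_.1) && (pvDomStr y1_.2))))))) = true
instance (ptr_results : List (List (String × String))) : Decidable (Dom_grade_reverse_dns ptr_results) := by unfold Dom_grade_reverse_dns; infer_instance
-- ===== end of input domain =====

-- B replaces A's three filtering comprehensions by one single pass keeping three counters
-- and the ips of the first three missing records (same branch priority); alternative decomposition, not claimed faster.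


-- r[k] on the dict built from the association list (Python dict(pairs): later duplicate keys overwrite)
def pvGet (r : List (String × String)) (k : String) : Option String :=
  (PySem.Dict.ofList r).get? k

-- ===== PORT A =====
def grade_reverse_dns (ptr_results : List (List (String × String))) : List (String × String) :=
  if ptr_results = [] then
    [("grade", "INFO"), ("reason", "No MX records — reverse DNS not applicable")]
  else
    let missing := ptr_results.filter (fun r => pvGet r "status" == some "missing")
    let mismatched := ptr_results.filter (fun r => pvGet r "status" == some "mismatch")
    let confirmed := ptr_results.filter (fun r => pvGet r "status" == some "confirmed")
    if missing ≠ [] then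
      -- r["ip"]: KeyError (pvGet = none) is excluded by Pre_; getD "" is never read there
      let ips := PySem.Str.join ", " ((missing.take 3).map (fun r => (pvGet r "ip").getD ""))
      [("grade", "FAIL"),
       ("reason", PySem.Str.join "" ["No PTR record for ", PySem.Int.toStr (missing.length : Int), " IP(s): ", ips])]
    else if mismatched ≠ [] then
      [("grade", "WARN"),
       ("reason", PySem.Str.join "" [PySem.Int.toStr (mismatched.length : Int), " IP(s) have PTR but fail forward confirmation"])]
    else
      [("grade", "PASS"),
       ("reason", PySem.Str.join "" ["All ", PySem.Int.toStr (confirmed.length : Int), " mail server IP(s) have valid forward-confirmed rDNS"])]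

-- ===== PORT B =====
-- the single pass of Source B: state = (first_ips, n_missing, n_mismatch, n_confirmed)
def pvLoop : List (List (String × String)) → List String × Nat × Nat × Nat → List String × Nat × Nat × Nat
  | [], st => st
  | r :: rest, (ips, nm, nmm, nc) =>
    let s := (pvGet r "status").getD ""   -- r["status"]; KeyError excluded by Pre_
    if s == "missing" then
      pvLoop rest (if ips.length < 3 then ips ++ [(pvGet r "ip").getD ""] else ips, nm + 1, nmm, nc)
    else if s == "mismatch" then
      pvLoop rest (ips, nm, nmm + 1, nc)
    else if s == "confirmed" then
      pvLoop rest (ips, nm, nmm, nc + 1)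
    else
      pvLoop rest (ips, nm, nmm, nc)

def grade_reverse_dns_alt (ptr_results : List (List (String × String))) : List (String × String) :=
  if ptr_results = [] then
    [("grade", "INFO"), ("reason", "No MX records — reverse DNS not applicable")]
  else
    let st := pvLoop ptr_results ([], 0, 0, 0)
    if st.2.1 ≠ 0 then
      [("grade", "FAIL"),
       ("reason", PySem.Str.join "" ["No PTR record for ", PySem.Int.toStr (st.2.1 : Int), " IP(s): ", PySem.Str.join ", " st.1])]
    else if st.2.2.1 ≠ 0 then
      [("grade", "WARN"),
       ("reason", PySem.Str.join "" [PySem.Int.toStr (st.2.2.1 : Int), " IP(s) have PTR but fail forward confirmation"])]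
    else
      [("grade", "PASS"),
       ("reason", PySem.Str.join "" ["All ", PySem.Int.toStr (st.2.2.2 : Int), " mail server IP(s) have valid forward-confirmed rDNS"])]

-- ===== PRECONDITION & SPEC =====
-- Pre_ excludes exactly the KeyErrors of A: a record without "status", or one of the first
-- three missing-status records without "ip" (only those ips are ever read, by missing[:3]).
def Pre_grade_reverse_dns (ptr_results : List (List (String × String))) : Prop :=
  (∀ r ∈ ptr_results, (pvGet r "status").isSome) ∧
  (∀ r ∈ (ptr_results.filter (fun r => pvGet r "status" == some "missing")).take 3,
     (pvGet r "ip").isSome)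
instance (ptr_results : List (List (String × String))) : Decidable (Pre_grade_reverse_dns ptr_results) := by unfold Pre_grade_reverse_dns; infer_instance
def pvWitness_grade_reverse_dns : (List (List (String × String))) :=
  [[("status", "missing"), ("ip", "1.2.3.4")], [("status", "confirmed")]]

def Spec_grade_reverse_dns (ptr_results : List (List (String × String))) (out : List (String × String)) : Prop := out = grade_reverse_dns_alt ptr_results
instance (ptr_results : List (List (String × String))) (out : List (String × String)) : Decidable (Spec_grade_reverse_dns ptr_results out) := by unfold Spec_grade_reverse_dns; infer_instance

-- ===== CLAIM (what is proved, stated in full; the proofs are below) =====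
def Claim_equal_grade_reverse_dns : Prop := ∀ (ptr_results : List (List (String × String))), Dom_grade_reverse_dns ptr_results → Pre_grade_reverse_dns ptr_results → Spec_grade_reverse_dns ptr_results (grade_reverse_dns ptr_results)

-- ===== LEMMAS AND PROOFS =====

-- Python's `r["status"] == k` (via getD "") agrees with A's option comparison for nonempty k.
lemma pvGet_getD_beq (r : List (String × String)) (k : String) (hk : ("" == k) = false) :
    (((pvGet r "status").getD "" == k)) = (pvGet r "status" == some k) := by
  cases h : pvGet r "status" <;> simp [hk]

lemma pvLoop_spec (xs : List (List (String × String))) :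
    ∀ ips nm nmm nc, pvLoop xs (ips, nm, nmm, nc) =
      (ips ++ ((xs.filter (fun r => pvGet r "status" == some "missing")).take (3 - ips.length)).map
          (fun r => (pvGet r "ip").getD ""),
       nm + (xs.filter (fun r => pvGet r "status" == some "missing")).length,
       nmm + (xs.filter (fun r => pvGet r "status" == some "mismatch")).length,
       nc + (xs.filter (fun r => pvGet r "status" == some "confirmed")).length) := by
  induction xs with
  | nil => intro ips nm nmm nc; simp [pvLoop]
  | cons r rest ih =>
    intro ips nm nmm nc
    have h1 := pvGet_getD_beq r "missing" (by decide)
    have h2 := pvGet_getD_beq r "mismatch" (by decide)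
    have h3 := pvGet_getD_beq r "confirmed" (by decide)
    simp only [pvLoop, h1, h2, h3]
    by_cases hm : (pvGet r "status" == some "missing") = true
    · have hmm : (pvGet r "status" == some "mismatch") = false := by
        simp only [beq_iff_eq] at hm ⊢; simp [hm]
      have hc : (pvGet r "status" == some "confirmed") = false := by
        simp only [beq_iff_eq] at hm ⊢; simp [hm]
      by_cases hlt : ips.length < 3
      · obtain ⟨k, hk⟩ : ∃ k, 3 - ips.length = k + 1 := ⟨2 - ips.length, by omega⟩
        simp only [hm, if_true, if_pos hlt]
        rw [ih]
        simp only [List.filter_cons, hm, hmm, hc, if_true, Bool.false_eq_true,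
          if_false, hk, List.take_succ_cons, List.map_cons, List.length_append, List.length_cons,
          List.length_nil, Nat.zero_add, List.append_assoc, List.singleton_append, Prod.mk.injEq]
        rw [show 3 - (ips.length + 1) = k from by omega]
        and_intros <;> first | rfl | trivial | omega
      · have h0 : 3 - ips.length = 0 := by omega
        simp only [hm, if_true, if_neg hlt]
        rw [ih]
        simp only [List.filter_cons, hm, hmm, hc, if_true, Bool.false_eq_true,
          if_false, h0, List.take_zero, List.map_nil, List.append_nil, List.length_cons,
          Prod.mk.injEq]
        and_intros <;> first | rfl | trivial | omega
    · rw [Bool.not_eq_true] at hm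
      by_cases hmm : (pvGet r "status" == some "mismatch") = true
      · have hc : (pvGet r "status" == some "confirmed") = false := by
          simp only [beq_iff_eq] at hmm ⊢; simp [hmm]
        simp only [hm, hmm, if_true, Bool.false_eq_true, if_false]
        rw [ih]
        simp only [List.filter_cons, hm, hmm, hc, if_true, Bool.false_eq_true,
          if_false, List.length_cons, Prod.mk.injEq]
        and_intros <;> first | rfl | trivial | omega
      · rw [Bool.not_eq_true] at hmm
        by_cases hc : (pvGet r "status" == some "confirmed") = true
        · simp only [hm, hmm, hc, if_true, Bool.false_eq_true, if_false]
          rw [ih]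
          simp only [List.filter_cons, hm, hmm, hc, if_true, Bool.false_eq_true,
            if_false, List.length_cons, Prod.mk.injEq]
          and_intros <;> first | rfl | trivial | omega
        · rw [Bool.not_eq_true] at hc
          simp only [hm, hmm, hc, Bool.false_eq_true, if_false]
          rw [ih]
          simp only [List.filter_cons, hm, hmm, hc, Bool.false_eq_true, if_false]

-- ===== VERDICT (by name: the statement is the Claim_ definition above) =====
theorem grade_reverse_dns_spec : Claim_equal_grade_reverse_dns := by
  intro ptr_results _ _
  unfold Spec_grade_reverse_dns grade_reverse_dns grade_reverse_dns_alt
  by_cases hnil : ptr_results = []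
  · simp [hnil]
  · simp only [if_neg hnil]
    rw [pvLoop_spec]
    simp only [Nat.zero_add, List.length_nil, Nat.sub_zero, List.nil_append]
    have hmiss : ((ptr_results.filter (fun r => pvGet r "status" == some "missing")).length ≠ 0)
        ↔ (ptr_results.filter (fun r => pvGet r "status" == some "missing")) ≠ [] := by
      simp [List.length_eq_zero_iff]
    have hmm : ((ptr_results.filter (fun r => pvGet r "status" == some "mismatch")).length ≠ 0)
        ↔ (ptr_results.filter (fun r => pvGet r "status" == some "mismatch")) ≠ [] := by
      simp [List.length_eq_zero_iff]
    by_cases h1 : (ptr_results.filter (fun r => pvGet r "status" == some "missing")) = []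
    · by_cases h2 : (ptr_results.filter (fun r => pvGet r "status" == some "mismatch")) = []
      · simp [h1, h2]
      · simp [h1, h2, List.length_eq_zero_iff]
    · simp [h1, List.length_eq_zero_iff, List.map_take]
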